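-- pv_equiv track=rewrite | github.com/olevar2/MD | testing/system_validation/system_validator.py | _generate_timing_recommendations
-- ===== SOURCE A (Python) =====
-- from typing import Dict, List, Any
--
-- def _generate_timing_recommendations(issues: List[str]) -> List[str]:
--     """Generate timing-specific recommendations"""
--     recommendations = []
--
--     for issue in issues:
--         if "slow" in issue.lower():
--             recommendations.append("Profile component performance")
--             recommendations.append("Consider component optimization")
--             recommendations.append("Review resource allocation")
--
--     return recommendations
-- ===== SOURCE B (Python) =====
-- def _generate_timing_recommendations(issues):
--     """Divide-and-conquer: split the list in halves, solve each half
--     recursively, and concatenate; the base case emits the fixed block for a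
--     single slow issue.  (Recursion depth O(log n).)"""
--     def rec(seg):
--         if len(seg) == 0:
--             return []
--         if len(seg) == 1:
--             if "slow" in seg[0].lower():
--                 return ["Profile component performance",
--                         "Consider component optimization",
--                         "Review resource allocation"]
--             return []
--         mid = len(seg) // 2
--         return rec(seg[:mid]) + rec(seg[mid:])
--     return rec(issues)
-- ===== Notes on version B (the rewrite author's own statement) =====
-- stated objective: alternative
-- what changed: B replaces A's single forward loop with an append accumulator by a divide-and-conquer recursion: split the list in halves, recurse on each half, and concatenate the two results, with the three-recommendation block emitted only in the singleton base case.
import Mathlib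
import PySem

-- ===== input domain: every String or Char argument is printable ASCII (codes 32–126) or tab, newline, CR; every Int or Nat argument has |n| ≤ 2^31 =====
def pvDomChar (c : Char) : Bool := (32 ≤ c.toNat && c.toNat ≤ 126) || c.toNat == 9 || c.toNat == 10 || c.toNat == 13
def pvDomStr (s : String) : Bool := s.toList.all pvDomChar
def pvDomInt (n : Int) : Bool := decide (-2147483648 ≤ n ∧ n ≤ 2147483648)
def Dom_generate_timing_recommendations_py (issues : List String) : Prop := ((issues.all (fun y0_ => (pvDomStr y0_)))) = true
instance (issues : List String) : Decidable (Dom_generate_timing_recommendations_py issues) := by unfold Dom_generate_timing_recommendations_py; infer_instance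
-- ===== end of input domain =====

-- B replaces A's forward accumulator loop by a divide-and-conquer recursion (split in halves, concatenate) — an alternative decomposition, same cost.


-- ===== PORT A =====
def generate_timing_recommendations_py (issues : List String) : List String :=
  issues.foldl (fun recommendations issue =>
    if PySem.Str.isIn "slow" (PySem.Str.lower issue) then
      ((recommendations ++ ["Profile component performance"])
        ++ ["Consider component optimization"])
        ++ ["Review resource allocation"]
    else recommendations) []

-- ===== PORT B =====
-- B: divide-and-conquer — split in halves, recurse, concatenate; block emitted at singleton base case.
def gtrRec (seg : List String) : List String :=
  if seg.length = 0 then []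
  else if seg.length = 1 then
    if PySem.Str.isIn "slow" (PySem.Str.lower seg.headI) then
      ["Profile component performance",
       "Consider component optimization",
       "Review resource allocation"]
    else []
  else
    let mid := seg.length / 2
    gtrRec (seg.take mid) ++ gtrRec (seg.drop mid)
termination_by seg.length
decreasing_by
  · simpa [mid] using by omega
  · simpa [mid] using by omega

def generate_timing_recommendations_py_alt (issues : List String) : List String :=
  gtrRec issues

-- ===== PRECONDITION & SPEC =====
def Spec_generate_timing_recommendations_py (issues : List String) (out : List String) : Prop := out = generate_timing_recommendations_py_alt issues
instance (issues : List String) (out : List String) : Decidable (Spec_generate_timing_recommendations_py issues out) := by unfold Spec_generate_timing_recommendations_py; infer_instance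

-- ===== CLAIM (what is proved, stated in full; the proofs are below) =====
def Claim_equal_generate_timing_recommendations_py : Prop := ∀ (issues : List String), Dom_generate_timing_recommendations_py issues → Spec_generate_timing_recommendations_py issues (generate_timing_recommendations_py issues)

-- ===== LEMMAS AND PROOFS =====
-- Characterisation: the block repeated once per matching issue, as filter + flatMap.
def gtrF (seg : List String) : List String :=
  (seg.filter (fun issue => PySem.Str.isIn "slow" (PySem.Str.lower issue))).flatMap
    (fun _ => ["Profile component performance",
               "Consider component optimization",
               "Review resource allocation"])

theorem gtr_cond (x : String) :
    (PySem.Str.isIn "slow" (PySem.Str.lower x))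
    = PySem.Chars.isIn ['s','l','o','w'] (PySem.Chars.lower x.toList) := by
  simp [PySem.Str.isIn, PySem.Str.lower]

theorem gtrF_append (s t : List String) : gtrF (s ++ t) = gtrF s ++ gtrF t := by
  simp [gtrF]

theorem gtrRec_eq (seg : List String) : gtrRec seg = gtrF seg := by
  induction seg using gtrRec.induct with
  | case1 seg h0 =>
    rw [gtrRec]
    simp_all [gtrF, List.length_eq_zero_iff]
  | case2 seg h0 h1 hc =>
    obtain ⟨x, hx⟩ := List.length_eq_one_iff.mp h1
    subst hx
    rw [gtrRec, if_neg h0, if_pos h1, if_pos hc]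
    simp at hc
    simp [gtrF, List.filter, hc]
  | case3 seg h0 h1 hc =>
    obtain ⟨x, hx⟩ := List.length_eq_one_iff.mp h1
    subst hx
    rw [gtrRec, if_neg h0, if_pos h1, if_neg hc]
    simp at hc
    simp [gtrF, List.filter, hc]
  | case4 seg h0 h1 mid ih1 ih2 =>
    rw [gtrRec, if_neg h0, if_neg h1]
    show gtrRec _ ++ gtrRec _ = _
    rw [ih1, ih2, ← gtrF_append, List.take_append_drop]

theorem gtr_foldl_eq (issues : List String) (acc : List String) :
    issues.foldl (fun recommendations issue =>
      if PySem.Str.isIn "slow" (PySem.Str.lower issue) then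
        ((recommendations ++ ["Profile component performance"])
          ++ ["Consider component optimization"])
          ++ ["Review resource allocation"]
      else recommendations) acc
    = acc ++ gtrF issues := by
  induction issues generalizing acc with
  | nil => simp [gtrF]
  | cons x xs ih =>
    rw [List.foldl_cons]
    by_cases h : PySem.Str.isIn "slow" (PySem.Str.lower x) = true
    · rw [if_pos h, ih]
      rw [gtr_cond] at h
      simp [gtrF, h]
    · rw [if_neg h, ih]
      rw [gtr_cond] at h
      simp [gtrF, h]

-- ===== VERDICT (by name: the statement is the Claim_ definition above) =====
theorem generate_timing_recommendations_py_spec : Claim_equal_generate_timing_recommendations_py := by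
  intro issues _
  show _ = _
  rw [generate_timing_recommendations_py, generate_timing_recommendations_py_alt,
    gtrRec_eq, gtr_foldl_eq]
  simp
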